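-- pv_equiv track=rewrite | github.com/Ahn-Jeongmin/CodingTest_Practice | 프로그래머스/0/120956. 옹알이 （1）/옹알이 （1）.py | solution
-- ===== SOURCE A (Python) =====
-- def solution(babbling):
--     valid_babbles = ["aya", "ye", "woo", "ma"]
--     answer = 0
--
--     for word in babbling:
--         for babble in valid_babbles:
--             if babble in word:
--                 word = word.replace(babble, " ")
--         word = word.replace(" ", "")
--         if word == "":
--             answer += 1
--
--     return answer
-- ===== SOURCE B (Python) =====
-- def solution(babbling):
--     answer = 0
--     for word in babbling:
--         i, n, ok = 0, len(word), True
--         while i < n: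
--             if word.startswith("aya", i):
--                 i += 3
--             elif word.startswith("ye", i):
--                 i += 2
--             elif word.startswith("woo", i):
--                 i += 3
--             elif word.startswith("ma", i):
--                 i += 2
--             else:
--                 ok = False
--                 break
--         if ok:
--             answer += 1
--     return answer
-- ===== Notes on version B (the rewrite author's own statement) =====
-- stated objective: alternative
-- what changed: Replaces A's chain of four global str.replace passes plus a space-deletion pass with a single left-to-right greedy tiling scan per word (valid because the four babbles have pairwise distinct first letters, so tiling is deterministic).
-- intended difference: On lists containing a word that has a space yet is a concatenation of babbles and spaces (e.g. ' ' or 'aya ma'), A counts the word because it uses ' ' as its deletion sentinel, while B does not count it; B's value is intended since a word containing a space is not composed of valid babbles. — e.g. on solution([" "]): A returns 1, B returns 0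
import Mathlib
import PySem

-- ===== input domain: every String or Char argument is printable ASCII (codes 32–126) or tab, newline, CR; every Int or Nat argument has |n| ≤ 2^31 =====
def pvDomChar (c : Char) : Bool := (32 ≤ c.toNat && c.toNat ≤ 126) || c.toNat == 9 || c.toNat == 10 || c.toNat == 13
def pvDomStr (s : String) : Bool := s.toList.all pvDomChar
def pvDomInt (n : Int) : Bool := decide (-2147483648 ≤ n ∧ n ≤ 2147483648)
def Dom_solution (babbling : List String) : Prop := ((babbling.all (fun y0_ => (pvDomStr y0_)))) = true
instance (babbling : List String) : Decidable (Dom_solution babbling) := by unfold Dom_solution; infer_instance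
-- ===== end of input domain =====

-- B replaces A's four global replace passes plus a space-deletion pass by one greedy front-to-back tiling scan per word
-- (an 'alternative' same-cost algorithm); on words that contain a space yet tile over {aya,ye,woo,ma,' '} A's space
-- sentinel makes A count them and B does not (see D_solution).


-- ===== PORT A =====
def solution (babbling : List String) : Int :=
  let valid_babbles : List String := ["aya", "ye", "woo", "ma"]
  babbling.foldl (fun answer word =>
    let word := valid_babbles.foldl (fun word babble =>
      if PySem.Str.isIn babble word then PySem.Str.replace word babble " " else word) word
    let word := PySem.Str.replace word " " ""
    if word == "" then answer + 1 else answer) 0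

-- ===== PORT B =====
-- B's inner while loop: try the four babbles at the current position (startswith), advance past the one
-- that matches, fail otherwise; recursion on the remaining characters = advancing the index i.
def tileB (s : List Char) : Bool :=
  match s with
  | [] => true
  | c :: t =>
    if ['a','y','a'].isPrefixOf (c :: t) then tileB (t.drop 2)
    else if ['y','e'].isPrefixOf (c :: t) then tileB (t.drop 1)
    else if ['w','o','o'].isPrefixOf (c :: t) then tileB (t.drop 2)
    else if ['m','a'].isPrefixOf (c :: t) then tileB (t.drop 1)
    else false
termination_by s.length
decreasing_by all_goals (simp; try omega)

def solution_alt (babbling : List String) : Int :=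
  babbling.foldl (fun answer word => if tileB word.toList then answer + 1 else answer) 0

-- ===== PRECONDITION & SPEC =====
-- tiling over the five tokens A's replace pipeline cancels: the four babbles and the space A uses as sentinel
def dTile (s : List Char) : Bool :=
  match s with
  | [] => true
  | ' ' :: r => dTile r
  | 'a' :: 'y' :: 'a' :: r => dTile r
  | 'y' :: 'e' :: r => dTile r
  | 'w' :: 'o' :: 'o' :: r => dTile r
  | 'm' :: 'a' :: r => dTile r
  | _ => false

-- On lists containing a word that has a space yet is a concatenation of babbles and spaces (e.g. " " or "aya ma"),
-- A counts the word because it uses ' ' as its deletion sentinel, while B does not count it;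
-- B's value is intended since a word containing a space is not composed of valid babbles.
def D_solution (babbling : List String) : Prop :=
  (babbling.any (fun w => w.toList.contains ' ' && dTile w.toList)) = true
instance (babbling : List String) : Decidable (D_solution babbling) := by unfold D_solution; infer_instance

def Spec_solution (babbling : List String) (out : Int) : Prop := ¬ D_solution babbling → out = solution_alt babbling
instance (babbling : List String) (out : Int) : Decidable (Spec_solution babbling out) := by unfold Spec_solution; infer_instance

def pvDiffWitness_solution : List String := [" "]
def pvDiffWitnessOut_solution : Int × Int := (1, 0)

-- ===== CLAIM (what is proved, stated in full; the proofs are below) =====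
def Claim_unchanged_solution : Prop := ∀ (babbling : List String), Dom_solution babbling → Spec_solution babbling (solution babbling)
def Claim_changed_solution : Prop := Dom_solution (pvDiffWitness_solution) ∧ D_solution (pvDiffWitness_solution) ∧ solution (pvDiffWitness_solution) = pvDiffWitnessOut_solution.1 ∧ solution_alt (pvDiffWitness_solution) = pvDiffWitnessOut_solution.2 ∧ pvDiffWitnessOut_solution.1 ≠ pvDiffWitnessOut_solution.2
def Claim_exact_solution : Prop := ∀ (babbling : List String), Dom_solution babbling → D_solution babbling → solution babbling ≠ solution_alt babbling

-- ===== LEMMAS AND PROOFS =====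

theorem pref2_elim (x y : Char) (c : Char) (t : List Char) (h : [x, y].isPrefixOf (c :: t) = true) :
    c = x ∧ ∃ u, t = y :: u := by
  rcases t with _ | ⟨a, u⟩ <;> simp [List.isPrefixOf] at h
  · exact ⟨h.1.symm, u, by rw [h.2]⟩

theorem pref3_elim (x y z : Char) (c : Char) (t : List Char) (h : [x, y, z].isPrefixOf (c :: t) = true) :
    c = x ∧ ∃ u, t = y :: z :: u := by
  rcases t with _ | ⟨a, _ | ⟨b, u⟩⟩ <;> simp [List.isPrefixOf] at h
  · exact ⟨h.1.symm, u, by rw [h.2.1, h.2.2]⟩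

theorem pref_cons_false (x : Char) (xs : List Char) (c : Char) (t : List Char) (h : x ≠ c) :
    (x :: xs).isPrefixOf (c :: t) = false := by
  simp [List.isPrefixOf, h]

theorem pref_tail (x : Char) (xs : List Char) (t : List Char) :
    (x :: xs).isPrefixOf (x :: t) = xs.isPrefixOf t := by
  simp [List.isPrefixOf]

theorem single_pref (a : Char) (t : List Char) : [a].isPrefixOf t = (t.head? == some a) := by
  cases t with
  | nil => simp [List.isPrefixOf]
  | cons c u => simp [List.isPrefixOf, BEq.comm]

theorem pair_pref_head (a b : Char) (t : List Char) (h : t.head? ≠ some a) :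
    [a, b].isPrefixOf t = false := by
  cases t with
  | nil => simp [List.isPrefixOf]
  | cons c u =>
    simp only [List.head?_cons, ne_eq, Option.some.injEq] at h
    simp [List.isPrefixOf]
    intro hh
    exact absurd hh.symm h

def rep (old new : List Char) (s : List Char) : List Char :=
  match s with
  | [] => []
  | c :: t => if old.isPrefixOf (c :: t) then new ++ rep old new (t.drop (old.length - 1)) else c :: rep old new t
termination_by s.length
decreasing_by all_goals (simp; try omega)

theorem rep_nil (old new : List Char) : rep old new [] = [] := by rw [rep]

theorem rep_cons_pos (old new : List Char) (c : Char) (t : List Char) (h : old.isPrefixOf (c :: t) = true) :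
    rep old new (c :: t) = new ++ rep old new (t.drop (old.length - 1)) := by
  rw [rep, h]; simp

theorem rep_cons_neg (old new : List Char) (c : Char) (t : List Char) (h : old.isPrefixOf (c :: t) = false) :
    rep old new (c :: t) = c :: rep old new t := by
  rw [rep, h]; simp

theorem rep_pass (o : Char) (os new : List Char) (c : Char) (t : List Char) (h : o ≠ c) :
    rep (o :: os) new (c :: t) = c :: rep (o :: os) new t := by
  apply rep_cons_neg
  exact pref_cons_false o os c t h

theorem rep_head_sp (old : List Char) (s : List Char) :
    (rep old [' '] s).head? = some ' ' ∨ (rep old [' '] s).head? = s.head? := by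
  cases s with
  | nil => right; rw [rep_nil]
  | cons c t =>
    by_cases h : old.isPrefixOf (c :: t) = true
    · left; rw [rep_cons_pos _ _ _ _ h]; rfl
    · right; rw [rep_cons_neg _ _ _ _ (eq_false_of_ne_true h)]; rfl

theorem aya_eat (u : List Char) :
    rep ['a','y','a'] [' '] ('a'::'y'::'a'::u) = ' ' :: rep ['a','y','a'] [' '] u := by
  rw [rep_cons_pos _ _ _ _ (by simp [List.isPrefixOf])]; simp

theorem ye_eat (u : List Char) :
    rep ['y','e'] [' '] ('y'::'e'::u) = ' ' :: rep ['y','e'] [' '] u := by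
  rw [rep_cons_pos _ _ _ _ (by simp [List.isPrefixOf])]; simp

theorem woo_eat (u : List Char) :
    rep ['w','o','o'] [' '] ('w'::'o'::'o'::u) = ' ' :: rep ['w','o','o'] [' '] u := by
  rw [rep_cons_pos _ _ _ _ (by simp [List.isPrefixOf])]; simp

theorem ma_eat (u : List Char) :
    rep ['m','a'] [' '] ('m'::'a'::u) = ' ' :: rep ['m','a'] [' '] u := by
  rw [rep_cons_pos _ _ _ _ (by simp [List.isPrefixOf])]; simp

theorem sp_eat (u : List Char) :
    rep [' '] [] (' '::u) = rep [' '] [] u := by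
  rw [rep_cons_pos _ _ _ _ (by simp [List.isPrefixOf])]; simp

theorem head2 (t : List Char) :
    (rep ['y','e'] [' '] (rep ['a','y','a'] [' '] t)).head? = some ' ' ∨
    (rep ['y','e'] [' '] (rep ['a','y','a'] [' '] t)).head? = t.head? := by
  rcases rep_head_sp ['y','e'] (rep ['a','y','a'] [' '] t) with h | h
  · left; exact h
  · rcases rep_head_sp ['a','y','a'] t with h2 | h2
    · left; rw [h, h2]
    · right; rw [h, h2]

theorem head3 (t : List Char) :
    (rep ['w','o','o'] [' '] (rep ['y','e'] [' '] (rep ['a','y','a'] [' '] t))).head? = some ' ' ∨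
    (rep ['w','o','o'] [' '] (rep ['y','e'] [' '] (rep ['a','y','a'] [' '] t))).head? = t.head? := by
  rcases rep_head_sp ['w','o','o'] (rep ['y','e'] [' '] (rep ['a','y','a'] [' '] t)) with h | h
  · left; exact h
  · rcases head2 t with h2 | h2
    · left; rw [h, h2]
    · right; rw [h, h2]

theorem go_eq_rep (old new : List Char) (hold : old ≠ []) :
    ∀ fuel l acc, l.length ≤ fuel → PySem.Chars.replace.go old new fuel l acc = acc.reverse ++ rep old new l := by
  intro fuel
  induction fuel with
  | zero =>
    intro l acc h
    have hl : l = [] := List.eq_nil_of_length_eq_zero (Nat.le_zero.mp h)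
    subst hl
    simp [PySem.Chars.replace.go, rep]
  | succ n ih =>
    intro l acc h
    cases l with
    | nil => simp [PySem.Chars.replace.go, rep]
    | cons c t =>
      obtain ⟨o, os, rfl⟩ : ∃ o os, old = o :: os := by
        cases old with
        | nil => exact absurd rfl hold
        | cons o os => exact ⟨o, os, rfl⟩
      rw [PySem.Chars.replace.go]
      rw [rep]
      by_cases hp : (o :: os).isPrefixOf (c :: t) = true
      · simp only [hp, if_true]
        have hdrop : List.drop (o :: os).length (c :: t) = t.drop ((o :: os).length - 1) := by
          simp [List.drop_succ_cons]
        rw [hdrop]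
        have hlen : (t.drop ((o :: os).length - 1)).length ≤ n := by
          have : (t.drop ((o :: os).length - 1)).length ≤ t.length := by simp
          simp at h
          omega
        rw [ih _ _ hlen]
        simp
      · simp only [hp]
        simp only [Bool.false_eq_true, if_false]
        have hlen : t.length ≤ n := by simp at h; omega
        rw [ih _ _ hlen]
        simp

theorem replace_eq_rep (s old new : List Char) (hold : old ≠ []) :
    PySem.Chars.replace s old new = rep old new s := by
  rw [PySem.Chars.replace]
  have : old.isEmpty = false := by cases old with | nil => exact absurd rfl hold | cons a b => rfl
  rw [this]
  simpa using go_eq_rep old new hold s.length s [] (le_refl _)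

theorem isIn_cons_of_isIn (old : List Char) (c : Char) (t : List Char)
    (h : PySem.Chars.isIn old t = true) : PySem.Chars.isIn old (c :: t) = true := by
  rw [PySem.Chars.isIn_iff_infix] at h ⊢
  exact h.trans (List.suffix_cons c t).isInfix

theorem rep_of_not_isIn_aux (old new : List Char) :
    ∀ (n : Nat) (s : List Char), s.length ≤ n → PySem.Chars.isIn old s = false → rep old new s = s := by
  intro n
  induction n with
  | zero =>
    intro s hl _
    have : s = [] := List.eq_nil_of_length_eq_zero (Nat.le_zero.mp hl)
    subst this
    exact rep_nil old new
  | succ n ih =>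
    intro s hl h
    cases s with
    | nil => exact rep_nil old new
    | cons c t =>
      have hnp : old.isPrefixOf (c :: t) = false := by
        by_contra hcon
        have hp : old.isPrefixOf (c :: t) = true := by
          cases hx : old.isPrefixOf (c :: t) with
          | false => exact absurd hx hcon
          | true => rfl
        rw [List.isPrefixOf_iff_prefix] at hp
        have : PySem.Chars.isIn old (c :: t) = true := by
          rw [PySem.Chars.isIn_iff_infix]; exact hp.isInfix
        rw [this] at h; exact absurd h (by simp)
      have ht : PySem.Chars.isIn old t = false := by
        cases hx : PySem.Chars.isIn old t with
        | false => rfl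
        | true => rw [isIn_cons_of_isIn old c t hx] at h; exact absurd h (by simp)
      rw [rep_cons_neg _ _ _ _ hnp, ih t (by simp at hl; omega) ht]

theorem rep_of_not_isIn (old new s : List Char) (h : PySem.Chars.isIn old s = false) :
    rep old new s = s :=
  rep_of_not_isIn_aux old new s.length s (le_refl _) h

def G (s : List Char) : Bool :=
  match s with
  | [] => true
  | c :: t =>
    if ['a','y','a'].isPrefixOf (c :: t) then G (t.drop 2)
    else if ['y','e'].isPrefixOf (c :: t) then G (t.drop 1)
    else if ['w','o','o'].isPrefixOf (c :: t) then G (t.drop 2)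
    else if ['m','a'].isPrefixOf (c :: t) then G (t.drop 1)
    else if c = ' ' then G t
    else false
termination_by s.length
decreasing_by all_goals (simp; try omega)

def pipe (s : List Char) : Bool :=
  rep [' '] [] (rep ['m','a'] [' '] (rep ['w','o','o'] [' '] (rep ['y','e'] [' '] (rep ['a','y','a'] [' '] s)))) == []

theorem pipe_eq_G_aux : ∀ (n : Nat) (s : List Char), s.length ≤ n → pipe s = G s := by
  intro n
  induction n with
  | zero =>
    intro s hl
    have : s = [] := List.eq_nil_of_length_eq_zero (Nat.le_zero.mp hl)
    subst this
    rw [G.eq_def]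
    simp [pipe, rep_nil]
  | succ n ih =>
    intro s hl
    cases s with
    | nil =>
      rw [G.eq_def]
      simp [pipe, rep_nil]
    | cons c t =>
      simp only [List.length_cons, Nat.add_le_add_iff_right] at hl
      unfold pipe
      rw [G.eq_def]
      simp only
      by_cases h1 : ['a','y','a'].isPrefixOf (c :: t) = true
      · obtain ⟨rfl, u, rfl⟩ := pref3_elim _ _ _ _ _ h1
        rw [aya_eat u, rep_pass 'y' ['e'] [' '] ' ' _ (by decide),
            rep_pass 'w' ['o','o'] [' '] ' ' _ (by decide),
            rep_pass 'm' ['a'] [' '] ' ' _ (by decide), sp_eat]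
        simp only [h1, if_true, List.drop_succ_cons, List.drop_zero]
        exact ih u (by simp at hl; omega)
      · have h1' : ['a','y','a'].isPrefixOf (c :: t) = false := eq_false_of_ne_true h1
        by_cases h2 : ['y','e'].isPrefixOf (c :: t) = true
        · obtain ⟨rfl, u, rfl⟩ := pref2_elim _ _ _ _ h2
          rw [rep_pass 'a' ['y','a'] [' '] 'y' _ (by decide),
              rep_pass 'a' ['y','a'] [' '] 'e' _ (by decide),
              ye_eat, rep_pass 'w' ['o','o'] [' '] ' ' _ (by decide),
              rep_pass 'm' ['a'] [' '] ' ' _ (by decide), sp_eat]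
          simp only [h1', h2, Bool.false_eq_true, if_false, if_true, List.drop_succ_cons, List.drop_zero]
          exact ih u (by simp at hl; omega)
        · have h2' : ['y','e'].isPrefixOf (c :: t) = false := eq_false_of_ne_true h2
          by_cases h3 : ['w','o','o'].isPrefixOf (c :: t) = true
          · obtain ⟨rfl, u, rfl⟩ := pref3_elim _ _ _ _ _ h3
            rw [rep_pass 'a' ['y','a'] [' '] 'w' _ (by decide),
                rep_pass 'a' ['y','a'] [' '] 'o' _ (by decide),
                rep_pass 'a' ['y','a'] [' '] 'o' _ (by decide),
                rep_pass 'y' ['e'] [' '] 'w' _ (by decide),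
                rep_pass 'y' ['e'] [' '] 'o' _ (by decide),
                rep_pass 'y' ['e'] [' '] 'o' _ (by decide),
                woo_eat, rep_pass 'm' ['a'] [' '] ' ' _ (by decide), sp_eat]
            simp only [h1', h2', h3, Bool.false_eq_true, if_false, if_true, List.drop_succ_cons, List.drop_zero]
            exact ih u (by simp at hl; omega)
          · have h3' : ['w','o','o'].isPrefixOf (c :: t) = false := eq_false_of_ne_true h3
            by_cases h4 : ['m','a'].isPrefixOf (c :: t) = true
            · obtain ⟨rfl, u, rfl⟩ := pref2_elim _ _ _ _ h4
              by_cases hya : ['y','a'].isPrefixOf u = true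
              · obtain ⟨r, hr⟩ := List.isPrefixOf_iff_prefix.mp hya
                simp only [List.cons_append, List.nil_append] at hr
                subst hr
                rw [rep_pass 'a' ['y','a'] [' '] 'm' _ (by decide), aya_eat,
                    rep_pass 'y' ['e'] [' '] 'm' _ (by decide),
                    rep_pass 'y' ['e'] [' '] ' ' _ (by decide),
                    rep_pass 'w' ['o','o'] [' '] 'm' _ (by decide),
                    rep_pass 'w' ['o','o'] [' '] ' ' _ (by decide)]
                rw [rep_cons_neg ['m','a'] [' '] 'm' _ (by rw [pref_tail, single_pref]; simp),
                    rep_pass 'm' ['a'] [' '] ' ' _ (by decide),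
                    rep_pass ' ' [] [] 'm' _ (by decide)]
                simp only [h1', h2', h3', h4, Bool.false_eq_true, if_false, if_true,
                  List.drop_succ_cons, List.drop_zero]
                rw [G.eq_def]
                simp only [pref_cons_false 'a' ['y','a'] 'y' _ (by decide),
                  pref_tail 'y' ['e'] _, single_pref, List.head?_cons,
                  pref_cons_false 'w' ['o','o'] 'y' _ (by decide),
                  pref_cons_false 'm' ['a'] 'y' _ (by decide)]
                simp
              · have hya' : ['y','a'].isPrefixOf u = false := eq_false_of_ne_true hya
                rw [rep_pass 'a' ['y','a'] [' '] 'm' _ (by decide),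
                    rep_cons_neg ['a','y','a'] [' '] 'a' _ (by rw [pref_tail]; exact hya'),
                    rep_pass 'y' ['e'] [' '] 'm' _ (by decide),
                    rep_pass 'y' ['e'] [' '] 'a' _ (by decide),
                    rep_pass 'w' ['o','o'] [' '] 'm' _ (by decide),
                    rep_pass 'w' ['o','o'] [' '] 'a' _ (by decide),
                    ma_eat, sp_eat]
                simp only [h1', h2', h3', h4, Bool.false_eq_true, if_false, if_true,
                  List.drop_succ_cons, List.drop_zero]
                exact ih u (by simp at hl; omega)
            · have h4' : ['m','a'].isPrefixOf (c :: t) = false := eq_false_of_ne_true h4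
              by_cases h5 : c = ' '
              · subst h5
                rw [rep_pass 'a' ['y','a'] [' '] ' ' _ (by decide),
                    rep_pass 'y' ['e'] [' '] ' ' _ (by decide),
                    rep_pass 'w' ['o','o'] [' '] ' ' _ (by decide),
                    rep_pass 'm' ['a'] [' '] ' ' _ (by decide), sp_eat]
                simp only [h1', h2', h3', h4', Bool.false_eq_true, if_false, if_true]
                exact ih t hl
              · -- fall-through: the head character c survives every pass
                have hs1 : rep ['a','y','a'] [' '] (c :: t) = c :: rep ['a','y','a'] [' '] t :=
                  rep_cons_neg _ _ _ _ h1'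
                have hYe : ['y','e'].isPrefixOf (c :: rep ['a','y','a'] [' '] t) = false := by
                  by_cases hcy : c = 'y'
                  · subst hcy
                    rw [pref_tail, single_pref]
                    have ht : t.head? ≠ some 'e' := by
                      rw [pref_tail, single_pref] at h2'
                      simpa using h2'
                    rcases rep_head_sp ['a','y','a'] t with h | h <;> rw [h] <;> simp_all
                  · exact pref_cons_false _ _ _ _ (fun hh => hcy hh.symm)
                have hWoo : ['w','o','o'].isPrefixOf (c :: rep ['y','e'] [' '] (rep ['a','y','a'] [' '] t)) = false := by
                  by_cases hcw : c = 'w'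
                  · subst hcw
                    rw [pref_tail]
                    have ht : ['o','o'].isPrefixOf t = false := by
                      rw [pref_tail] at h3'; exact h3'
                    cases t with
                    | nil => simp [rep_nil, List.isPrefixOf]
                    | cons d v =>
                      by_cases hdo : d = 'o'
                      · subst hdo
                        rw [rep_pass 'a' ['y','a'] [' '] 'o' _ (by decide),
                            rep_pass 'y' ['e'] [' '] 'o' _ (by decide)]
                        rw [pref_tail, single_pref]
                        have hv : v.head? ≠ some 'o' := by
                          rw [pref_tail, single_pref] at ht
                          simpa using ht
                        rcases head2 v with h | h <;> rw [h] <;> simp_all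
                      · apply pair_pref_head
                        rcases head2 (d :: v) with h | h <;> rw [h] <;> simp
                        · exact fun hh => hdo hh
                  · exact pref_cons_false _ _ _ _ (fun hh => hcw hh.symm)
                have hMa : ['m','a'].isPrefixOf (c :: rep ['w','o','o'] [' '] (rep ['y','e'] [' '] (rep ['a','y','a'] [' '] t))) = false := by
                  by_cases hcm : c = 'm'
                  · subst hcm
                    rw [pref_tail, single_pref]
                    have ht : t.head? ≠ some 'a' := by
                      rw [pref_tail, single_pref] at h4'
                      simpa using h4'
                    rcases head3 t with h | h <;> rw [h] <;> simp_all
                  · exact pref_cons_false _ _ _ _ (fun hh => hcm hh.symm)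
                rw [hs1, rep_cons_neg _ _ _ _ hYe, rep_cons_neg _ _ _ _ hWoo,
                    rep_cons_neg _ _ _ _ hMa,
                    rep_pass ' ' [] [] c _ (fun hh => h5 hh.symm)]
                simp only [h1', h2', h3', h4', h5, Bool.false_eq_true, if_false]
                simp

theorem pipe_eq_G (s : List Char) : pipe s = G s := pipe_eq_G_aux s.length s (le_refl _)

theorem dTile_eq_G (s : List Char) : dTile s = G s := by
  induction s using dTile.induct
  case case1 => rw [G.eq_def]; rfl
  case case2 r ih => rw [G.eq_def]; simp [List.isPrefixOf]; exact ih
  case case3 r ih => rw [G.eq_def]; simp [List.isPrefixOf]; exact ih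
  case case4 r ih => rw [G.eq_def]; simp [List.isPrefixOf]; exact ih
  case case5 r ih => rw [G.eq_def]; simp [List.isPrefixOf]; exact ih
  case case6 r ih => rw [G.eq_def]; simp [List.isPrefixOf]; exact ih
  case case7 x h1 h2 h3 h4 h5 h6 =>
    obtain ⟨c, t, rfl⟩ : ∃ c t, x = c :: t := by
      cases x with
      | nil => exact absurd rfl h1
      | cons c t => exact ⟨c, t, rfl⟩
    have haya : ['a','y','a'].isPrefixOf (c :: t) = false := by
      cases hx : ['a','y','a'].isPrefixOf (c :: t) with
      | false => rfl
      | true =>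
        obtain ⟨rfl, u, rfl⟩ := pref3_elim _ _ _ _ _ hx
        exact absurd rfl (h3 u)
    have hye : ['y','e'].isPrefixOf (c :: t) = false := by
      cases hx : ['y','e'].isPrefixOf (c :: t) with
      | false => rfl
      | true =>
        obtain ⟨rfl, u, rfl⟩ := pref2_elim _ _ _ _ hx
        exact absurd rfl (h4 u)
    have hwoo : ['w','o','o'].isPrefixOf (c :: t) = false := by
      cases hx : ['w','o','o'].isPrefixOf (c :: t) with
      | false => rfl
      | true =>
        obtain ⟨rfl, u, rfl⟩ := pref3_elim _ _ _ _ _ hx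
        exact absurd rfl (h5 u)
    have hma : ['m','a'].isPrefixOf (c :: t) = false := by
      cases hx : ['m','a'].isPrefixOf (c :: t) with
      | false => rfl
      | true =>
        obtain ⟨rfl, u, rfl⟩ := pref2_elim _ _ _ _ hx
        exact absurd rfl (h6 u)
    have hsp : ¬ (c = ' ') := by
      intro hc; subst hc; exact absurd rfl (h2 t)
    rw [dTile.eq_def, G.eq_def]
    split <;> simp_all

theorem tileB_no_space_aux : ∀ (n : Nat) (s : List Char), s.length ≤ n → tileB s = true → s.contains ' ' = false := by
  intro n
  induction n with
  | zero =>
    intro s hl _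
    have : s = [] := List.eq_nil_of_length_eq_zero (Nat.le_zero.mp hl)
    subst this; simp
  | succ n ih =>
    intro s hl h
    cases s with
    | nil => simp
    | cons c t =>
      simp only [List.length_cons, Nat.add_le_add_iff_right] at hl
      rw [tileB.eq_def] at h
      simp only at h
      split at h
      · rename_i hpre
        obtain ⟨rfl, u, rfl⟩ := pref3_elim _ _ _ _ _ hpre
        have hu := ih u (by simp at hl; omega) (by simpa using h)
        simpa using hu
      · split at h
        · rename_i hpre
          obtain ⟨rfl, u, rfl⟩ := pref2_elim _ _ _ _ hpre
          have hu := ih u (by simp at hl; omega) (by simpa using h)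
          simpa using hu
        · split at h
          · rename_i hpre
            obtain ⟨rfl, u, rfl⟩ := pref3_elim _ _ _ _ _ hpre
            have hu := ih u (by simp at hl; omega) (by simpa using h)
            simpa using hu
          · split at h
            · rename_i hpre
              obtain ⟨rfl, u, rfl⟩ := pref2_elim _ _ _ _ hpre
              have hu := ih u (by simp at hl; omega) (by simpa using h)
              simpa using hu
            · simp at h

theorem tileB_no_space (s : List Char) (h : tileB s = true) : s.contains ' ' = false :=
  tileB_no_space_aux s.length s (le_refl _) h

theorem drop_contains (t : List Char) (k : Nat) (h : t.contains ' ' = false) :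
    (t.drop k).contains ' ' = false := by
  rw [List.contains_eq_any_beq] at h ⊢
  simp only [List.any_eq_false] at h ⊢
  exact fun x hx => h x (List.mem_of_mem_drop hx)

theorem tileB_eq_G_aux : ∀ (n : Nat) (s : List Char), s.length ≤ n → s.contains ' ' = false → tileB s = G s := by
  intro n
  induction n with
  | zero =>
    intro s hl _
    have : s = [] := List.eq_nil_of_length_eq_zero (Nat.le_zero.mp hl)
    subst this
    rw [tileB.eq_def, G.eq_def]
  | succ n ih =>
    intro s hl hsp
    cases s with
    | nil => rw [tileB.eq_def, G.eq_def]
    | cons c t =>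
      simp only [List.length_cons, Nat.add_le_add_iff_right] at hl
      have hc : ¬ (c = ' ') := by
        intro hc; subst hc; simp at hsp
      have ht : t.contains ' ' = false := by
        simp at hsp; simpa using hsp.2
      rw [tileB.eq_def, G.eq_def]
      simp only
      split
      · exact ih _ (le_trans (by simpa using List.length_drop_le' 2 t) hl)
          (drop_contains t 2 ht)
      · split
        · exact ih _ (le_trans (by simpa using List.length_drop_le' 1 t) hl) (drop_contains t 1 ht)
        · split
          · exact ih _ (le_trans (by simpa using List.length_drop_le' 2 t) hl) (drop_contains t 2 ht)
          · split
            · exact ih _ (le_trans (by simpa using List.length_drop_le' 1 t) hl) (drop_contains t 1 ht)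
            · simp [hc]

theorem tileB_eq_G (s : List Char) (h : s.contains ' ' = false) : tileB s = G s :=
  tileB_eq_G_aux s.length s (le_refl _) h

theorem guard_toList (b w : String) (hb : b.toList ≠ []) :
    (if PySem.Str.isIn b w then PySem.Str.replace w b " " else w).toList = rep b.toList [' '] w.toList := by
  by_cases h : PySem.Str.isIn b w = true
  · rw [if_pos h]
    have hbr : (PySem.Str.replace w b " ").toList = PySem.Chars.replace w.toList b.toList " ".toList := by
      simp
    rw [hbr, show " ".toList = [' '] from rfl, replace_eq_rep _ _ _ hb]
  · rw [if_neg (by simpa using h)]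
    rw [rep_of_not_isIn]
    have : PySem.Chars.isIn b.toList w.toList = false := by
      cases hx : PySem.Chars.isIn b.toList w.toList with
      | false => rfl
      | true => exact absurd (by simpa using hx) h
    exact this

theorem str_empty_beq (x : String) : (x == "") = (x.toList == []) := by
  by_cases hx : x = ""
  · subst hx; rfl
  · have hne : x.toList ≠ [] := fun hh => hx (String.toList_eq_nil_iff.mp hh)
    rw [beq_eq_false_iff_ne.mpr hx, beq_eq_false_iff_ne.mpr hne]

theorem word_chain_toList (w : String) :
    (["aya", "ye", "woo", "ma"].foldl (fun word babble =>
        if PySem.Str.isIn babble word then PySem.Str.replace word babble " " else word) w).toList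
    = rep ['m','a'] [' '] (rep ['w','o','o'] [' '] (rep ['y','e'] [' '] (rep ['a','y','a'] [' '] w.toList))) := by
  simp only [List.foldl_cons, List.foldl_nil]
  rw [guard_toList "ma" _ (by decide), guard_toList "woo" _ (by decide),
      guard_toList "ye" _ (by decide), guard_toList "aya" _ (by decide)]
  rfl

theorem word_test (w : String) :
    ((PySem.Str.replace
        (["aya", "ye", "woo", "ma"].foldl (fun word babble =>
          if PySem.Str.isIn babble word then PySem.Str.replace word babble " " else word) w)
        " " "") == "") = pipe w.toList := by
  rw [str_empty_beq]
  have hbr : (PySem.Str.replace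
      (["aya", "ye", "woo", "ma"].foldl (fun word babble =>
        if PySem.Str.isIn babble word then PySem.Str.replace word babble " " else word) w)
      " " "").toList
      = rep [' '] []
          (["aya", "ye", "woo", "ma"].foldl (fun word babble =>
            if PySem.Str.isIn babble word then PySem.Str.replace word babble " " else word) w).toList := by
    have : (PySem.Str.replace
        (["aya", "ye", "woo", "ma"].foldl (fun word babble =>
          if PySem.Str.isIn babble word then PySem.Str.replace word babble " " else word) w)
        " " "").toList
        = PySem.Chars.replace
            (["aya", "ye", "woo", "ma"].foldl (fun word babble =>
              if PySem.Str.isIn babble word then PySem.Str.replace word babble " " else word) w).toList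
            " ".toList "".toList := by simp
    rw [this, show " ".toList = [' '] from rfl, show "".toList = ([] : List Char) from rfl,
        replace_eq_rep _ _ _ (by decide)]
  rw [hbr, word_chain_toList w]
  rfl

theorem solution_eq_count (babbling : List String) :
    solution babbling = babbling.foldl (fun a w => if G w.toList then a + 1 else a) 0 := by
  unfold solution
  apply PySem.List.foldl_congr_mem'
  intro w _ a
  dsimp only
  rw [word_test w, pipe_eq_G]

theorem countP_strict {α : Type} (p q : α → Bool) (l : List α)
    (hmono : ∀ x ∈ l, q x = true → p x = true) (x : α) (hx : x ∈ l)
    (hpx : p x = true) (hqx : q x = false) : l.countP q < l.countP p := by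
  induction l with
  | nil => exact absurd hx (by simp)
  | cons a l ih =>
    have hmono' : ∀ y ∈ l, q y = true → p y = true := fun y hy => hmono y (by simp [hy])
    have hle : l.countP q ≤ l.countP p := List.countP_mono_left hmono'
    rcases List.mem_cons.mp hx with rfl | hx'
    · simp only [List.countP_cons, hpx, hqx, if_true, if_false, Bool.false_eq_true]
      omega
    · have hlt := ih hmono' hx'
      simp only [List.countP_cons]
      have hif : (if q a = true then 1 else 0) ≤ (if p a = true then 1 else 0) := by
        by_cases hqa : q a = true
        · rw [hmono a (by simp) hqa]; simp [hqa]
        · simp [hqa]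
      omega

theorem tileB_eq_of_not_bad (w : String)
    (h : ¬ (w.toList.contains ' ' && dTile w.toList) = true) : G w.toList = tileB w.toList := by
  by_cases hsp : w.toList.contains ' ' = true
  · have hdt : dTile w.toList = false := by
      cases hx : dTile w.toList with
      | false => rfl
      | true => exact absurd (by rw [hsp, hx]; rfl) h
    have hG : G w.toList = false := by rw [← dTile_eq_G]; exact hdt
    have hB : tileB w.toList = false := by
      cases hx : tileB w.toList with
      | false => rfl
      | true => rw [tileB_no_space _ hx] at hsp; exact absurd hsp (by simp)
    rw [hG, hB]
  · exact (tileB_eq_G _ (eq_false_of_ne_true hsp)).symm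

theorem main_spec (babbling : List String) (hD : ¬ D_solution babbling) :
    solution babbling = solution_alt babbling := by
  rw [solution_eq_count]
  unfold solution_alt
  apply PySem.List.foldl_congr_mem' (h := ?_)
  intro w hw a
  rw [tileB_eq_of_not_bad w ?_]
  intro hbad
  exact hD (List.any_eq_true.mpr ⟨w, hw, hbad⟩)

theorem main_tight (babbling : List String) (hD : D_solution babbling) :
    solution babbling ≠ solution_alt babbling := by
  rw [solution_eq_count]
  unfold solution_alt
  have e1 : List.foldl (fun a w => if G w.toList = true then a + 1 else a) (0 : Int) babbling
      = 0 + (babbling.countP (fun w => G w.toList) : Int) :=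
    PySem.List.foldl_if_add_one _ _ _
  have e2 : List.foldl (fun answer word => if tileB word.toList = true then answer + 1 else answer) (0 : Int) babbling
      = 0 + (babbling.countP (fun w => tileB w.toList) : Int) :=
    PySem.List.foldl_if_add_one _ _ _
  rw [e1, e2]
  obtain ⟨w, hw, hbad⟩ := List.any_eq_true.mp hD
  rw [Bool.and_eq_true] at hbad
  have hpw : G w.toList = true := by rw [← dTile_eq_G]; exact hbad.2
  have hqw : tileB w.toList = false := by
    cases hx : tileB w.toList with
    | false => rfl
    | true =>
      rw [tileB_no_space _ hx] at hbad
      exact absurd hbad.1 (by simp)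
  have hmono : ∀ x ∈ babbling, tileB x.toList = true → G x.toList = true := by
    intro x _ hx
    rw [← tileB_eq_G _ (tileB_no_space _ hx)]
    exact hx
  have := countP_strict (fun w => G w.toList) (fun w => tileB w.toList) babbling hmono w hw hpw hqw
  intro he
  omega

-- ===== VERDICT (by name: the statement is the Claim_ definition above) =====
theorem solution_spec : Claim_unchanged_solution := by
  intro babbling _ hD
  exact main_spec babbling hD

theorem solution_changed : Claim_changed_solution := by
  unfold Claim_changed_solution
  refine ⟨by decide, ?_, by decide, ?_, by decide⟩
  · unfold D_solution
    decide
  · show solution_alt [" "] = 0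
    unfold solution_alt
    simp [List.foldl]
    rw [tileB.eq_def]
    decide

theorem solution_tight : Claim_exact_solution := by
  intro babbling _ hD
  exact main_tight babbling hD
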